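-- pv_equiv track=rewrite | github.com/MteaHubHug/BioinformaticsAlgorithms | ALGORITMI U BIOINFORMATICI/BioinformaticsAlgorithms_by_Matea/FragileRegionsInHumanGenome.py | split_edges_to_chromosomes
-- ===== SOURCE A (Python) =====
-- def split_edges_to_chromosomes(edges):
--     final_pairs = []
--     for i, pair in enumerate(edges):
--         if pair[0] > pair[1]:
--             final_pairs.append(i)
--
--     chromosomes = []
--     previous = 0
--     for end in final_pairs:
--         chromosomes.append(edges[previous : (end + 1)])
--         previous = end + 1
--     return chromosomes
-- ===== SOURCE B (Python) =====
-- def split_edges_to_chromosomes(edges):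
--     # One pass: buffer the current chromosome, flush on a descending pair;
--     # trailing edges after the last descending pair are discarded (as in A).
--     chromosomes = []
--     current = []
--     for pair in edges:
--         current.append(pair)
--         if pair[0] > pair[1]:
--             chromosomes.append(current)
--             current = []
--     return chromosomes
-- ===== Notes on version B (the rewrite author's own statement) =====
-- stated objective: simpler
-- what changed: Replaces A's two passes (collect descending-pair indices, then slice the list at those indices) with a single pass that buffers the current chromosome and flushes it on each descending pair.
import Mathlib
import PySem

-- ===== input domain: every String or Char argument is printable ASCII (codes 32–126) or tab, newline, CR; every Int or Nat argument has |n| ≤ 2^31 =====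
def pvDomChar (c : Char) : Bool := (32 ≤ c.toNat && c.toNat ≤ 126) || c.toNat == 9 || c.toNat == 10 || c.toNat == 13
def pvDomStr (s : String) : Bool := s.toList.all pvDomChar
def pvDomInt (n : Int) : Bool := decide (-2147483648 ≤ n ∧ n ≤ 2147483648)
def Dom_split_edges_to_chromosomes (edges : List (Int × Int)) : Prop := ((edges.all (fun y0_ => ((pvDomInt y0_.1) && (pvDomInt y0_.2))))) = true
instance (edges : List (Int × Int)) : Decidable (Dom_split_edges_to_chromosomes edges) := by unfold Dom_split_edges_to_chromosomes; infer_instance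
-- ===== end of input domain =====

-- B replaces A's two passes (index list, then slicing) with one pass and a buffer; objective: simpler.

-- ===== PORT A =====
def split_edges_to_chromosomes (edges : List (Int × Int)) : List (List (Int × Int)) :=
  -- final_pairs = [i for i, pair in enumerate(edges) if pair[0] > pair[1]] (as an append loop)
  let final_pairs : List Int :=
    (PySem.List.enumerate edges).foldl
      (fun acc ip => if ip.2.1 > ip.2.2 then acc ++ [ip.1] else acc) []
  -- second loop: chromosomes/previous state over final_pairs, slicing edges
  let st :=
    final_pairs.foldl
      (fun (st : List (List (Int × Int)) × Int) e =>
        (st.1 ++ [PySem.List.slice edges (some st.2) (some (e + 1))], e + 1))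
      ([], 0)
  st.1

-- ===== PORT B =====
-- the single loop of Source B: state = (chromosomes, current)
def altGo (chroms : List (List (Int × Int))) (current : List (Int × Int)) :
    List (Int × Int) → List (List (Int × Int))
  | [] => chroms
  | p :: rest =>
    let cur' := current ++ [p]
    if p.1 > p.2 then altGo (chroms ++ [cur']) [] rest else altGo chroms cur' rest

def split_edges_to_chromosomes_alt (edges : List (Int × Int)) : List (List (Int × Int)) :=
  altGo [] [] edges

-- ===== PRECONDITION & SPEC =====
def Spec_split_edges_to_chromosomes (edges : List (Int × Int)) (out : List (List (Int × Int))) : Prop := out = split_edges_to_chromosomes_alt edges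
instance (edges : List (Int × Int)) (out : List (List (Int × Int))) : Decidable (Spec_split_edges_to_chromosomes edges out) := by unfold Spec_split_edges_to_chromosomes; infer_instance

-- ===== CLAIM (what is proved, stated in full; the proofs are below) =====
def Claim_equal_split_edges_to_chromosomes : Prop := ∀ (edges : List (Int × Int)), Dom_split_edges_to_chromosomes edges → Spec_split_edges_to_chromosomes edges (split_edges_to_chromosomes edges)

-- ===== LEMMAS AND PROOFS =====

-- prepend a list onto the first chunk (identity on the empty chunk list)
def pfirst (a : List (Int × Int)) : List (List (Int × Int)) → List (List (Int × Int))
  | [] => []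
  | c :: cs => (a ++ c) :: cs

-- A's first loop, generalized over the enumerate start
def fpAux (xs : List (Int × Int)) (s : Int) : List Int :=
  (PySem.List.enumerate xs s).foldl
    (fun acc ip => if ip.2.1 > ip.2.2 then acc ++ [ip.1] else acc) []

-- A's second loop
def loop2 (edges : List (Int × Int)) (st : List (List (Int × Int)) × Int) (fps : List Int) :
    List (List (Int × Int)) × Int :=
  fps.foldl
    (fun st e => (st.1 ++ [PySem.List.slice edges (some st.2) (some (e + 1))], e + 1)) st

lemma A_eq (edges : List (Int × Int)) :
    split_edges_to_chromosomes edges = (loop2 edges ([], 0) (fpAux edges 0)).1 := rfl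

lemma fp_acc (l : List (Int × Int)) (s : Int) (acc : List Int) :
    (PySem.List.enumerate l s).foldl
        (fun acc ip => if ip.2.1 > ip.2.2 then acc ++ [ip.1] else acc) acc
      = acc ++ fpAux l s := by
  induction l generalizing s acc with
  | nil => simp [fpAux, PySem.List.enumerate_nil]
  | cons x xs ih =>
    simp only [fpAux, PySem.List.enumerate_cons, List.foldl_cons]
    rw [ih, ih]
    split_ifs <;> simp

lemma fpAux_cons (x : Int × Int) (xs : List (Int × Int)) (s : Int) :
    fpAux (x :: xs) s = (if x.1 > x.2 then [s] else []) ++ fpAux xs (s + 1) := by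
  simp only [fpAux, PySem.List.enumerate_cons, List.foldl_cons]
  rw [fp_acc]
  split_ifs <;> simp [fpAux]

lemma fpAux_succ (xs : List (Int × Int)) (s : Int) :
    fpAux xs (s + 1) = (fpAux xs s).map (· + 1) := by
  induction xs generalizing s with
  | nil => simp [fpAux, PySem.List.enumerate_nil]
  | cons x xs ih =>
    rw [fpAux_cons, fpAux_cons, ih (s + 1)]
    split_ifs <;> simp

lemma fpAux_le (xs : List (Int × Int)) (s e : Int) (he : e ∈ fpAux xs s) : s ≤ e := by
  induction xs generalizing s with
  | nil => simp [fpAux, PySem.List.enumerate_nil] at he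
  | cons x xs ih =>
    rw [fpAux_cons] at he
    rcases List.mem_append.1 he with h | h
    · split_ifs at h <;> simp_all
    · have := ih (s + 1) h; omega

lemma loop2_acc (edges : List (Int × Int)) (fps : List Int) (C : List (List (Int × Int)))
    (prev : Int) : (loop2 edges (C, prev) fps).1 = C ++ (loop2 edges ([], prev) fps).1 := by
  induction fps generalizing C prev with
  | nil => simp [loop2]
  | cons e fps ih =>
    simp only [loop2, List.foldl_cons]
    rw [show ∀ (a : List (List (Int × Int))) p l, (List.foldl
      (fun st e => (st.1 ++ [PySem.List.slice edges (some st.2) (some (e + 1))], e + 1))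
      (a, p) l) = loop2 edges (a, p) l from fun _ _ _ => rfl,
      show ∀ (a : List (List (Int × Int))) p l, (List.foldl
      (fun st e => (st.1 ++ [PySem.List.slice edges (some st.2) (some (e + 1))], e + 1))
      (a, p) l) = loop2 edges (a, p) l from fun _ _ _ => rfl]
    rw [ih, ih ([] ++ [_])]
    simp

lemma slice_shift (x : Int × Int) (xs : List (Int × Int)) (a b : Int) (ha : 0 ≤ a) (hb : 0 ≤ b) :
    PySem.List.slice (x :: xs) (some (a + 1)) (some (b + 1))
      = PySem.List.slice xs (some a) (some b) := by
  rw [PySem.List.slice_toNat (x :: xs) (by omega) (by omega),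
      PySem.List.slice_toNat xs ha hb]
  have h1 : (a + 1).toNat = a.toNat + 1 := by omega
  have h3 : (b + 1).toNat - (a.toNat + 1) = b.toNat - a.toNat := by omega
  rw [h1, h3, List.drop_succ_cons]

lemma loop2_shift (x : Int × Int) (xs : List (Int × Int)) (fps : List Int)
    (hn : ∀ e ∈ fps, 0 ≤ e) (C : List (List (Int × Int))) (prev : Int) (hp : 0 ≤ prev) :
    (loop2 (x :: xs) (C, prev + 1) (fps.map (· + 1))).1 = (loop2 xs (C, prev) fps).1 := by
  induction fps generalizing C prev with
  | nil => simp [loop2]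
  | cons e fps ih =>
    have he : 0 ≤ e := hn e (List.mem_cons_self ..)
    simp only [List.map_cons, loop2, List.foldl_cons]
    rw [show ∀ (a : List (List (Int × Int))) p l, (List.foldl
      (fun st e => (st.1 ++ [PySem.List.slice (x :: xs) (some st.2) (some (e + 1))], e + 1))
      (a, p) l) = loop2 (x :: xs) (a, p) l from fun _ _ _ => rfl,
      show ∀ (a : List (List (Int × Int))) p l, (List.foldl
      (fun st e => (st.1 ++ [PySem.List.slice xs (some st.2) (some (e + 1))], e + 1))
      (a, p) l) = loop2 xs (a, p) l from fun _ _ _ => rfl]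
    rw [slice_shift x xs prev (e + 1) hp (by omega)]
    exact ih (fun e' h => hn e' (List.mem_cons_of_mem _ h)) _ (e + 1) (by omega)

lemma slice_cons_zero (x : Int × Int) (xs : List (Int × Int)) (e : Int) (he : 0 ≤ e) :
    PySem.List.slice (x :: xs) (some 0) (some (e + 2))
      = x :: PySem.List.slice xs (some 0) (some (e + 1)) := by
  rw [PySem.List.slice_toNat (x :: xs) (by omega) (by omega),
      PySem.List.slice_toNat xs (by omega) (by omega)]
  have h1 : (e + 2).toNat = (e + 1).toNat + 1 := by omega
  simp [h1]

lemma A_cons (x : Int × Int) (xs : List (Int × Int)) :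
    split_edges_to_chromosomes (x :: xs)
      = if x.1 > x.2 then [x] :: split_edges_to_chromosomes xs
        else pfirst [x] (split_edges_to_chromosomes xs) := by
  rw [A_eq, A_eq, fpAux_cons, fpAux_succ]
  have hnn : ∀ e ∈ fpAux xs 0, 0 ≤ e := fun e he => fpAux_le xs 0 e he
  split_ifs with hd
  · simp only [List.singleton_append]
    show (loop2 (x :: xs) (([] : List (List (Int × Int))) ++
        [PySem.List.slice (x :: xs) (some 0) (some (0 + 1))], 0 + 1)
        ((fpAux xs 0).map (· + 1))).1 = _
    rw [loop2_shift x xs _ hnn _ 0 le_rfl]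
    have hx : PySem.List.slice (x :: xs) (some 0) (some (0 + 1)) = [x] := by
      rw [PySem.List.slice_toNat (x :: xs) (by omega) (by omega)]; rfl
    rw [hx, loop2_acc]
    simp
  · simp only [List.nil_append]
    cases h : fpAux xs 0 with
    | nil => simp [loop2, pfirst]
    | cons e rest =>
      have he : 0 ≤ e := hnn e (h ▸ List.mem_cons_self ..)
      have hrest : ∀ e' ∈ rest, 0 ≤ e' := fun e' he' => hnn e' (h ▸ List.mem_cons_of_mem _ he')
      simp only [List.map_cons]
      show (loop2 (x :: xs) (([] : List (List (Int × Int))) ++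
          [PySem.List.slice (x :: xs) (some 0) (some (e + 1 + 1))], e + 1 + 1)
          (rest.map (· + 1))).1 = _
      show (loop2 (x :: xs) ([PySem.List.slice (x :: xs) (some 0) (some (e + 1 + 1))]
          , (e + 1) + 1) (rest.map (· + 1))).1 = _
      rw [loop2_shift x xs rest hrest _ (e + 1) (by omega)]
      have hc : PySem.List.slice (x :: xs) (some 0) (some (e + 1 + 1))
          = x :: PySem.List.slice xs (some 0) (some (e + 1)) := by
        have : e + 1 + 1 = e + 2 := by ring
        rw [this, slice_cons_zero x xs e he]
      rw [hc, loop2_acc]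
      conv_rhs => rw [show loop2 xs ([], 0) (e :: rest)
        = loop2 xs ([] ++ [PySem.List.slice xs (some 0) (some (e + 1))], e + 1) rest from rfl,
        loop2_acc]
      simp [pfirst]

-- B-side structural lemmas
lemma altGo_acc (xs : List (Int × Int)) (C : List (List (Int × Int))) (cur : List (Int × Int)) :
    altGo C cur xs = C ++ altGo [] cur xs := by
  induction xs generalizing C cur with
  | nil => simp [altGo]
  | cons p rest ih =>
    simp only [altGo]
    split_ifs
    · rw [ih, ih ([] ++ _)]; simp
    · exact ih C _

lemma altGo_prepend (xs : List (Int × Int)) (a b : List (Int × Int)) :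
    altGo [] (a ++ b) xs = pfirst a (altGo [] b xs) := by
  induction xs generalizing a b with
  | nil => simp [altGo, pfirst]
  | cons p rest ih =>
    simp only [altGo]
    split_ifs
    · rw [altGo_acc rest ([] ++ [a ++ b ++ [p]]), altGo_acc rest ([] ++ [b ++ [p]])]
      simp [pfirst]
    · have : a ++ b ++ [p] = a ++ (b ++ [p]) := by simp
      rw [this, ih]

lemma alt_cons (x : Int × Int) (xs : List (Int × Int)) :
    split_edges_to_chromosomes_alt (x :: xs)
      = if x.1 > x.2 then [x] :: split_edges_to_chromosomes_alt xs
        else pfirst [x] (split_edges_to_chromosomes_alt xs) := by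
  simp only [split_edges_to_chromosomes_alt, altGo]
  split_ifs
  · rw [altGo_acc]; simp
  · have : ([] : List (Int × Int)) ++ [x] = [x] ++ [] := by simp
    show altGo [] ([] ++ [x]) xs = _
    rw [this, altGo_prepend]

-- ===== VERDICT (by name: the statement is the Claim_ definition above) =====
theorem split_edges_to_chromosomes_spec : Claim_equal_split_edges_to_chromosomes := by
  intro edges hD
  clear hD
  unfold Spec_split_edges_to_chromosomes
  induction edges with
  | nil => rfl
  | cons x xs ih =>
    rw [A_cons, alt_cons, ih]
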